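-- pv_equiv track=rewrite | github.com/yannikkellerde/ykutil | ykutil/python.py | list_find_new
-- ===== SOURCE A (Python) =====
-- def list_find_new(list_orig: list, list_new: list) -> list:
--     """list_new contains more content at the end than list_orig
--     but is also missing some parts of list_orig. This function
--     will find the new content in list_new and return it.
--
--     >>> list_find_new([1, 2, 3, 4], [1, 3, 4, 5, 6])
--     [5, 6]
--     """
--     # Credits to o1
--     last_match_index = -1  # position of the last matched element in list_new
--     for elem in list_orig:
--         # Find elem in list_new starting from last_match_index+1
--         try:
--             pos = list_new.index(elem, last_match_index + 1)
--             last_match_index = pos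
--         except ValueError:
--             # elem is not found in list_new after last_match_index, skip it
--             continue
--
--     # Everything after last_match_index in list_new is new
--     new_part = list_new[last_match_index + 1 :]
--     return new_part
-- ===== SOURCE B (Python) =====
-- def list_find_new(list_orig: list, list_new: list) -> list:
--     """Find the new tail content of list_new (see a.py's docstring).
--
--     One pass builds a value -> sorted-positions index; each element of
--     list_orig then consumes dead (too-small) positions lazily, so the whole
--     run is O(n + m) amortized instead of rescanning list_new per element.
--     """
--     positions = {}
--     for i, v in enumerate(list_new):
--         positions.setdefault(v, []).append(i)
--     last = -1
--     for elem in list_orig: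
--         ps = positions.get(elem)
--         if ps is None:
--             continue
--         k = 0
--         while k < len(ps) and ps[k] <= last:
--             k += 1
--         del ps[:k]
--         if ps:
--             last = ps[0]
--     return list_new[last + 1:]
-- ===== Notes on version B (the rewrite author's own statement) =====
-- stated objective: faster
-- what changed: Instead of rescanning list_new with list.index for every element of list_orig, B builds a value->positions index of list_new in one pass and advances through each position list lazily, discarding dead positions, so every position of list_new is consumed at most once.
import Mathlib
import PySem

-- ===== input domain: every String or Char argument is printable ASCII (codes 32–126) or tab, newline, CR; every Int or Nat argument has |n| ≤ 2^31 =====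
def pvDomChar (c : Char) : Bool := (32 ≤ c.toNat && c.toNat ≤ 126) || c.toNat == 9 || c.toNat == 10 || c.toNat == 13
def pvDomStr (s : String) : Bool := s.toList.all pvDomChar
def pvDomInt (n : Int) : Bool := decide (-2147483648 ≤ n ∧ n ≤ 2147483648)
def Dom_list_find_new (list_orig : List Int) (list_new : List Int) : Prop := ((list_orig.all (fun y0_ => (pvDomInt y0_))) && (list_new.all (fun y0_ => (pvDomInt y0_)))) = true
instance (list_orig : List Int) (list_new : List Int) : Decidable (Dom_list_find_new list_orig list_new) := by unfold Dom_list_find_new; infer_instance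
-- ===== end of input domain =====

-- B replaces A's per-element rescan of list_new (list.index with a start bound)
-- by a value→positions index built in one pass, with dead positions dropped lazily.

-- ===== PORT A =====
-- one step of A's loop; Python's `list_new.index(elem, last+1)` is ported as
-- index? on the suffix `list_new.drop start` with the offset re-added
-- (start = last_match_index + 1 ≥ 0 throughout, so the state is that Nat);
-- exact for start ≥ 0.
def pvStepA (list_new : List Int) (start : Nat) (elem : Int) : Nat :=
  match PySem.List.index? (list_new.drop start) elem with
  | some k => start + k + 1
  | none => start

def list_find_new (list_orig : List Int) (list_new : List Int) : List Int :=
  list_new.drop (list_orig.foldl (pvStepA list_new) 0)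

-- ===== PORT B =====
-- one step of B's main loop: look up elem's remaining positions, drop the dead
-- ones (the `while k … ; del ps[:k]` loop), store the rest back, advance last
def pvStepB (st : PySem.Dict Int (List Int) × Int) (elem : Int) :
    PySem.Dict Int (List Int) × Int :=
  match st.1.get? elem with
  | none => st
  | some ps =>
      let ps' := ps.dropWhile (fun p => p ≤ st.2)
      (st.1.insert elem ps', match ps' with | [] => st.2 | p :: _ => p)

def list_find_new_alt (list_orig : List Int) (list_new : List Int) : List Int :=
  let positions := (PySem.List.enumerate list_new).foldl
    (fun d iv => d.insert iv.2 (d.getD iv.2 [] ++ [iv.1])) PySem.Dict.empty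
  let last := (list_orig.foldl pvStepB (positions, -1)).2
  PySem.List.slice list_new (some (last + 1)) none

-- ===== PRECONDITION & SPEC =====
def Spec_list_find_new (list_orig : List Int) (list_new : List Int) (out : List Int) : Prop := out = list_find_new_alt list_orig list_new
instance (list_orig : List Int) (list_new : List Int) (out : List Int) : Decidable (Spec_list_find_new list_orig list_new out) := by unfold Spec_list_find_new; infer_instance

-- ===== CLAIM (what is proved, stated in full; the proofs are below) =====
def Claim_equal_list_find_new : Prop := ∀ (list_orig : List Int) (list_new : List Int), Dom_list_find_new list_orig list_new → Spec_list_find_new list_orig list_new (list_find_new list_orig list_new)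

-- ===== LEMMAS AND PROOFS =====

-- positions (as Ints, ascending) at which v occurs in a list
def pvIdxs : List Int → Int → List Int
  | [], _ => []
  | x :: xs, v => if x = v then 0 :: (pvIdxs xs v).map (· + 1) else (pvIdxs xs v).map (· + 1)

-- common specification of one greedy step: the first occurrence of v after last
def pvSpecStep (N : List Int) (last : Int) (v : Int) : Int :=
  match ((pvIdxs N v).filter (fun p => last < p)).head? with
  | some p => p
  | none => last

lemma pvIdxs_nonneg : ∀ {l : List Int} {v p : Int}, p ∈ pvIdxs l v → 0 ≤ p := by
  intro l
  induction l with
  | nil => intro v p h; simp [pvIdxs] at h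
  | cons x xs ih =>
    intro v p h
    simp only [pvIdxs] at h
    split at h
    · rcases List.mem_cons.1 h with rfl | h
      · omega
      · rcases List.mem_map.1 h with ⟨q, hq, rfl⟩; have := ih hq; omega
    · rcases List.mem_map.1 h with ⟨q, hq, rfl⟩; have := ih hq; omega

lemma pvIdxs_lt : ∀ {l : List Int} {v p : Int}, p ∈ pvIdxs l v → p < l.length := by
  intro l
  induction l with
  | nil => intro v p h; simp [pvIdxs] at h
  | cons x xs ih =>
    intro v p h
    simp only [pvIdxs, List.length_cons] at h ⊢
    push_cast
    split at h
    · rcases List.mem_cons.1 h with rfl | h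
      · omega
      · rcases List.mem_map.1 h with ⟨q, hq, rfl⟩; have := ih hq; omega
    · rcases List.mem_map.1 h with ⟨q, hq, rfl⟩; have := ih hq; omega

lemma pvIdxs_sorted (l : List Int) (v : Int) : (pvIdxs l v).Pairwise (· < ·) := by
  induction l with
  | nil => simp [pvIdxs]
  | cons x xs ih =>
    have hmap : ((pvIdxs xs v).map (· + 1)).Pairwise (· < ·) :=
      List.Pairwise.map _ (fun a b hab => by omega) ih
    simp only [pvIdxs]
    split
    · refine List.Pairwise.cons (fun p hp => ?_) hmap
      rcases List.mem_map.1 hp with ⟨q, hq, rfl⟩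
      have := pvIdxs_nonneg hq; omega
    · exact hmap

-- head of the position list = first index found by list.index
lemma pvHead_idxs (l : List Int) (v : Int) :
    (pvIdxs l v).head? = (PySem.List.index? l v).map (fun k => (k : Int)) := by
  induction l with
  | nil => simp [pvIdxs, PySem.List.index?]
  | cons x xs ih =>
    by_cases hx : x = v
    · subst hx
      rw [PySem.List.index?_cons_self]
      simp [pvIdxs]
    · rw [PySem.List.index?_cons_of_ne xs hx]
      simp only [pvIdxs, if_neg hx, List.head?_map, ih]
      cases hi : PySem.List.index? xs v <;> simp

-- first position ≥ s = list.index on the suffix from s, with the offset re-added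
lemma pvIdx_drop (l : List Int) (v : Int) : ∀ s : Nat,
    ((pvIdxs l v).filter (fun p => decide (((s : Nat) : Int) ≤ p))).head?
      = (PySem.List.index? (l.drop s) v).map (fun k => ((s + k : Nat) : Int)) := by
  induction l with
  | nil => intro s; simp [pvIdxs, PySem.List.index?]
  | cons x xs ih =>
    intro s
    cases s with
    | zero =>
      have hall : ((pvIdxs (x :: xs) v).filter (fun p => decide (((0 : Nat) : Int) ≤ p)))
          = pvIdxs (x :: xs) v :=
        List.filter_eq_self.2 (fun p hp => by simpa using pvIdxs_nonneg hp)
      rw [hall, List.drop_zero, pvHead_idxs]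
      simp only [Nat.zero_add, PySem.List.index?_eq_idxOf?]
      cases List.idxOf? v (x :: xs) <;> rfl
    | succ s' =>
      have hshift : ∀ L : List Int,
          ((L.map (· + 1)).filter (fun p => decide (((s' + 1 : Nat) : Int) ≤ p)))
            = (L.filter (fun p => decide (((s' : Nat) : Int) ≤ p))).map (· + 1) := by
        intro L
        rw [List.filter_map]
        congr 1
        apply List.filter_congr
        intro p _
        simp only [Function.comp_apply]
        rw [decide_eq_decide]
        push_cast
        omega
      have hidx : pvIdxs (x :: xs) v
          = (if x = v then [(0 : Int)] else []) ++ (pvIdxs xs v).map (· + 1) := by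
        simp only [pvIdxs]; split <;> simp
      have h0 : ((if x = v then [(0 : Int)] else []).filter
          (fun p => decide (((s' + 1 : Nat) : Int) ≤ p))) = [] := by
        split
        · simp only [List.filter_cons, List.filter_nil]
          have h1 : ¬ (((s' + 1 : Nat) : Int) ≤ 0) := by push_cast; omega
          rw [if_neg (by simp only [decide_eq_true_eq]; exact h1)]
        · rfl
      rw [hidx, List.filter_append, List.drop_succ_cons, h0, List.nil_append, hshift,
        List.head?_map, ih s']
      cases hi : PySem.List.index? (xs.drop s') v with
      | none => simp
      | some k => simp only [Option.map_some]; congr 1; push_cast; omega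

-- A's step equals the common spec step (shifted by one)
lemma pvStepA_spec (N : List Int) (v : Int) (s : Nat) :
    ((pvStepA N s v : Nat) : Int) = pvSpecStep N ((s : Int) - 1) v + 1 := by
  have hfil : ((pvIdxs N v).filter (fun p => decide ((s : Int) - 1 < p)))
      = (pvIdxs N v).filter (fun p => decide (((s : Nat) : Int) ≤ p)) := by
    apply List.filter_congr
    intro p _
    by_cases h : (s : Int) - 1 < p
    · have : ((s : Nat) : Int) ≤ p := by omega
      simp [h, this]
    · have : ¬ ((s : Nat) : Int) ≤ p := by omega
      simp [h, this]
  unfold pvStepA pvSpecStep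
  rw [hfil, pvIdx_drop]
  cases hi : PySem.List.index? (N.drop s) v with
  | none => simp
  | some k => simp only [Option.map_some]; push_cast; omega

lemma pvFoldA (orig N : List Int) : ∀ s : Nat,
    ((orig.foldl (pvStepA N) s : Nat) : Int)
      = orig.foldl (pvSpecStep N) ((s : Int) - 1) + 1 := by
  induction orig with
  | nil => intro s; simp
  | cons v orig' ih =>
    intro s
    simp only [List.foldl_cons]
    rw [ih]
    have h := pvStepA_spec N v s
    have h2 : ((pvStepA N s v : Nat) : Int) - 1 = pvSpecStep N ((s : Int) - 1) v := by omega
    rw [h2]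

-- the dict built by B's first loop holds exactly the position lists
lemma pvBuild_getD (l : List Int) : ∀ (s : Int) (d : PySem.Dict Int (List Int)) (v : Int),
    (((PySem.List.enumerate l s).foldl
        (fun d iv => d.insert iv.2 (d.getD iv.2 [] ++ [iv.1])) d).getD v [])
      = d.getD v [] ++ (pvIdxs l v).map (· + s) := by
  induction l with
  | nil => intro s d v; simp [PySem.List.enumerate_nil, pvIdxs]
  | cons x xs ih =>
    intro s d v
    rw [PySem.List.enumerate_cons]
    simp only [List.foldl_cons]
    rw [ih, PySem.Dict.getD_insert]
    have hmm : ∀ L : List Int, (L.map (· + 1)).map (· + s) = L.map (· + (s + 1)) := by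
      intro L
      rw [List.map_map]
      apply List.map_congr_left
      intro a _
      show a + 1 + s = a + (s + 1)
      omega
    by_cases hv : v = x
    · subst hv
      rw [show pvIdxs (v :: xs) v = 0 :: (pvIdxs xs v).map (· + 1) by simp [pvIdxs]]
      rw [if_pos rfl, List.map_cons, hmm, List.append_assoc]
      norm_num
    · rw [if_neg hv]
      simp only [pvIdxs]
      rw [if_neg (fun h => hv h.symm), hmm]

-- on an ascending list, B's dead-position drop is a filter
lemma pvDropWhile_filter : ∀ {l : List Int}, l.Pairwise (· < ·) → ∀ a : Int,
    l.dropWhile (fun p => p ≤ a) = l.filter (fun p => a < p) := by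
  intro l
  induction l with
  | nil => intro _ a; simp
  | cons x xs ih =>
    intro hs a
    rcases List.pairwise_cons.1 hs with ⟨hx, hxs⟩
    by_cases h : x ≤ a
    · rw [List.dropWhile_cons_of_pos (by simp [h]), ih hxs a,
        List.filter_cons_of_neg (by simp; omega)]
    · rw [List.dropWhile_cons_of_neg (by simp; omega),
        List.filter_cons_of_pos (by simp; omega)]
      congr 1
      refine (List.filter_eq_self.2 (fun p hp => ?_)).symm
      have h1 := hx p hp
      simp only [decide_eq_true_eq]
      omega

-- invariant of B's main loop: every stored list is ascending, in range, and
-- agrees with the true position list above `last`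
def pvInv (N : List Int) (d : PySem.Dict Int (List Int)) (last : Int) : Prop :=
  ∀ v : Int, (d.getD v []).Pairwise (· < ·)
    ∧ (∀ p ∈ d.getD v [], p < (N.length : Int))
    ∧ (d.getD v []).filter (fun p => last < p) = (pvIdxs N v).filter (fun p => last < p)

lemma pvFilter_filter_of_le {a b : Int} (hab : a ≤ b) (l : List Int) :
    (l.filter (fun p => a < p)).filter (fun p => b < p) = l.filter (fun p => b < p) := by
  rw [List.filter_filter]
  apply List.filter_congr
  intro p _
  by_cases h : b < p
  · have : a < p := by omega
    simp [h, this]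
  · simp [h]

lemma pvFoldB (N : List Int) : ∀ (orig : List Int) (d : PySem.Dict Int (List Int)) (last : Int),
    pvInv N d last → -1 ≤ last → last + 1 ≤ (N.length : Int) →
    (orig.foldl pvStepB (d, last)).2 = orig.foldl (pvSpecStep N) last
      ∧ -1 ≤ orig.foldl (pvSpecStep N) last
      ∧ orig.foldl (pvSpecStep N) last + 1 ≤ (N.length : Int) := by
  intro orig
  induction orig with
  | nil => intro d last hinv h1 h2; exact ⟨rfl, h1, h2⟩
  | cons v orig' ih =>
    intro d last hinv h1 h2
    obtain ⟨hsort, hbnd, hfil⟩ := hinv v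
    simp only [List.foldl_cons]
    cases hget : d.get? v with
    | none =>
      have hd : d.getD v [] = [] := by simp [PySem.Dict.getD, hget]
      have hspec : pvSpecStep N last v = last := by
        unfold pvSpecStep
        rw [← hfil, hd]
        simp
      have hstep : pvStepB (d, last) v = (d, last) := by
        simp only [pvStepB, hget]
      rw [hspec, hstep]
      exact ih d last hinv h1 h2
    | some ps =>
      have hd : d.getD v [] = ps := by simp [PySem.Dict.getD, hget]
      rw [hd] at hsort hbnd hfil
      have hstep : pvStepB (d, last) v
          = (d.insert v (ps.dropWhile (fun p => p ≤ last)),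
             match ps.dropWhile (fun p => p ≤ last) with | [] => last | p :: _ => p) := by
        simp only [pvStepB, hget]
      have hdw : ps.dropWhile (fun p => p ≤ last) = (pvIdxs N v).filter (fun p => last < p) :=
        (pvDropWhile_filter hsort last).trans hfil
      rw [hstep, hdw]
      cases hc : (pvIdxs N v).filter (fun p => last < p) with
      | nil =>
        have hspec : pvSpecStep N last v = last := by unfold pvSpecStep; rw [hc]; rfl
        rw [hspec]
        refine ih _ last ?_ h1 h2
        intro w
        by_cases hw : w = v
        · subst hw
          rw [PySem.Dict.getD_insert, if_pos rfl]
          exact ⟨List.Pairwise.nil, by simp, by simp [hc]⟩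
        · rw [PySem.Dict.getD_insert, if_neg hw]
          exact hinv w
      | cons p rest =>
        have hspec : pvSpecStep N last v = p := by unfold pvSpecStep; rw [hc]; rfl
        rw [hspec]
        have hpmem : p ∈ (pvIdxs N v).filter (fun q => decide (last < q)) := by rw [hc]; simp
        have hlastp : last < p := by simpa using List.of_mem_filter hpmem
        have hpbnd : p < (N.length : Int) := pvIdxs_lt (List.mem_of_mem_filter hpmem)
        refine ih _ p ?_ (by omega) (by omega)
        intro w
        by_cases hw : w = v
        · subst hw
          rw [PySem.Dict.getD_insert, if_pos rfl, ← hc]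
          refine ⟨List.Pairwise.filter _ (pvIdxs_sorted N w), ?_, ?_⟩
          · intro q hq
            exact pvIdxs_lt (List.mem_of_mem_filter hq)
          · exact pvFilter_filter_of_le (le_of_lt hlastp) _
        · rw [PySem.Dict.getD_insert, if_neg hw]
          obtain ⟨hs, hb, hf⟩ := hinv w
          refine ⟨hs, hb, ?_⟩
          calc (d.getD w []).filter (fun q => p < q)
              = ((d.getD w []).filter (fun q => last < q)).filter (fun q => p < q) :=
                (pvFilter_filter_of_le (le_of_lt hlastp) _).symm
            _ = ((pvIdxs N w).filter (fun q => last < q)).filter (fun q => p < q) := by rw [hf]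
            _ = (pvIdxs N w).filter (fun q => p < q) :=
                pvFilter_filter_of_le (le_of_lt hlastp) _

-- ===== VERDICT (by name: the statement is the Claim_ definition above) =====
theorem list_find_new_spec : Claim_equal_list_find_new := by
  intro orig N _
  show list_find_new orig N = list_find_new_alt orig N
  simp only [list_find_new, list_find_new_alt]
  have hbuild : ∀ v, (((PySem.List.enumerate N).foldl
      (fun d iv => d.insert iv.2 (d.getD iv.2 [] ++ [iv.1])) PySem.Dict.empty).getD v [])
      = pvIdxs N v := by
    intro v
    rw [pvBuild_getD]
    simp [PySem.Dict.getD, PySem.Dict.empty, PySem.Dict.get?]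
  have hinv : pvInv N ((PySem.List.enumerate N).foldl
      (fun d iv => d.insert iv.2 (d.getD iv.2 [] ++ [iv.1])) PySem.Dict.empty) (-1) := by
    intro v
    rw [hbuild v]
    exact ⟨pvIdxs_sorted N v, fun p hp => pvIdxs_lt hp, rfl⟩
  obtain ⟨hB, hlo, hhi⟩ := pvFoldB N orig _ (-1) hinv (le_refl _) (by simp)
  have hA := pvFoldA orig N 0
  have h01 : (((0 : Nat) : Int)) - 1 = -1 := by norm_num
  rw [h01] at hA
  rw [hB, PySem.List.slice_from N (a := List.foldl (pvSpecStep N) (-1) orig + 1) (by omega)]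
  congr 1
  omega
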